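-- pv_equiv track=rewrite | github.com/melbavarghesecbe-svg/smart-traffic-control-simulation | main.py | state_spans
-- ===== SOURCE A (Python) =====
-- def state_spans(states):
--     if not states:
--         return []
--
--     spans = []
--     start = 0
--     current_state = states[0]
--
--     for i in range(1, len(states)):
--         if states[i] != current_state:
--             spans.append((start, i - 1, current_state))
--             start = i
--             current_state = states[i]
--
--     spans.append((start, len(states) - 1, current_state))
--     return spans
-- ===== SOURCE B (Python) =====
-- def state_spans(states):
--     # Scan right-to-left, building the spans back-to-front: each element either
--     # extends the most recently begun (leftmost-so-far) run by lowering its start,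
--     # or opens a new single-element run; reverse once at the end.
--     rev = []
--     for i in range(len(states) - 1, -1, -1):
--         if rev and rev[-1][2] == states[i]:
--             rev[-1] = (i, rev[-1][1], rev[-1][2])
--         else:
--             rev.append((i, i, states[i]))
--     rev.reverse()
--     return rev
-- ===== Notes on version B (the rewrite author's own statement) =====
-- stated objective: alternative
-- what changed: B traverses the list right-to-left and builds the spans back-to-front: instead of A's forward scan that carries (start, current_state) and emits a span at each boundary, B either lowers the start of the most recently opened run or opens a fresh single-element run, then reverses the accumulated list once.
import Mathlib
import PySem

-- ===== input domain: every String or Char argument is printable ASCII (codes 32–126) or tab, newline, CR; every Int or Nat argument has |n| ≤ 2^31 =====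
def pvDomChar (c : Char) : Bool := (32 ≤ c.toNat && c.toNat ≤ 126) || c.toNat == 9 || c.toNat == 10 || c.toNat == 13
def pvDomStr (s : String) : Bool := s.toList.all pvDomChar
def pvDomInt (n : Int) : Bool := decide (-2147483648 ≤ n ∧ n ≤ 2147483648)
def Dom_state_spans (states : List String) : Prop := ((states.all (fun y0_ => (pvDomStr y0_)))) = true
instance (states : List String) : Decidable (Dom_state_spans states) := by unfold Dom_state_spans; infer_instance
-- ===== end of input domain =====

-- B traverses the list right-to-left building the spans back-to-front (extend the
-- most recently opened run's start, or open a new one, reverse once); objective: alternative.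

-- ===== PORT A =====
-- loop body of A's for-loop ((spans, start, current_state) is the fold state)
def aStep (states : List String) (acc : List (Int × Int × String) × Int × String) (i : Int) :
    List (Int × Int × String) × Int × String :=
  let si := PySem.List.pyGetD states i ""
  if si ≠ acc.2.2 then (acc.1 ++ [(acc.2.1, i - 1, acc.2.2)], i, si) else acc

def state_spans (states : List String) : List (Int × Int × String) :=
  if states = [] then []
  else
    let st := (PySem.List.pyRange 1 states.length 1).foldl (aStep states)
      ([], 0, PySem.List.pyGetD states 0 "")
    st.1 ++ [(st.2.1, (states.length : Int) - 1, st.2.2)]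

-- ===== PORT B =====
-- loop body of B's for-loop: rev is the span list built so far (in reverse order),
-- rev[-1] = getLast; 'if rev and rev[-1][2] == states[i]' with the then/else bodies
def bStep (states : List String) (rev : List (Int × Int × String)) (i : Int) :
    List (Int × Int × String) :=
  if h : rev ≠ [] then
    let last := rev.getLast h
    if last.2.2 == PySem.List.pyGetD states i "" then
      rev.dropLast ++ [(i, last.2.1, last.2.2)]
    else rev ++ [(i, i, PySem.List.pyGetD states i "")]
  else [(i, i, PySem.List.pyGetD states i "")]

def state_spans_alt (states : List String) : List (Int × Int × String) :=
  ((PySem.List.pyRange ((states.length : Int) - 1) (-1) (-1)).foldl (bStep states) []).reverse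

-- ===== PRECONDITION & SPEC =====
def Spec_state_spans (states : List String) (out : List (Int × Int × String)) : Prop := out = state_spans_alt states
instance (states : List String) (out : List (Int × Int × String)) : Decidable (Spec_state_spans states out) := by unfold Spec_state_spans; infer_instance

-- ===== CLAIM (what is proved, stated in full; the proofs are below) =====
def Claim_equal_state_spans : Prop := ∀ (states : List String), Dom_state_spans states → Spec_state_spans states (state_spans states)

-- ===== LEMMAS AND PROOFS =====

-- common characterisation: gSpec rest start i cur = the spans still to be produced when
-- rest = states[i:], the current run starts at 'start' and has state 'cur'
def gSpec : List String → Int → Int → String → List (Int × Int × String)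
  | [], start, i, cur => [(start, i - 1, cur)]
  | x :: rest, start, i, cur =>
    if x ≠ cur then (start, i - 1, cur) :: gSpec rest i (i + 1) x
    else gSpec rest start (i + 1) cur

theorem g_run (cur : String) (s : Int) : ∀ (xs : List String) (i : Int),
    gSpec xs s i cur =
      (s, i + ((xs.takeWhile (· == cur)).length : Int) - 1, cur) ::
        (match xs.dropWhile (· == cur) with
         | [] => []
         | y :: ys => gSpec ys (i + ((xs.takeWhile (· == cur)).length : Int))
                        (i + ((xs.takeWhile (· == cur)).length : Int) + 1) y) := by
  intro xs
  induction xs with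
  | nil => intro i; simp [gSpec]
  | cons x rest ih =>
    intro i
    by_cases hx : x = cur
    · subst hx
      simp only [gSpec, ne_eq, not_true_eq_false, if_false, List.takeWhile_cons,
        BEq.rfl, List.dropWhile_cons, if_true, List.length_cons, ih (i + 1)]
      push_cast
      ring_nf
    · have hb : (x == cur) = false := by simp [hx]
      simp [gSpec, hx, hb]

-- ===== A side =====
theorem A_loop_eq (states : List String) : ∀ (suff : List String) (k : Nat),
    states.drop k = suff → 1 ≤ k → k ≤ states.length →
    ∀ (spans : List (Int × Int × String)) (start : Int) (cur : String),
      (let st := (PySem.List.pyRange (k : Int) states.length 1).foldl (aStep states) (spans, start, cur);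
       st.1 ++ [(st.2.1, (states.length : Int) - 1, st.2.2)]) = spans ++ gSpec suff start k cur := by
  intro suff
  induction suff with
  | nil =>
    intro k hdrop hk hk2 spans start cur
    have hlen : states.length = k := by
      have := congrArg List.length hdrop; simp at this; omega
    rw [PySem.List.pyRange_one_eq_nil (by exact_mod_cast Nat.le_of_eq hlen)]
    simp [gSpec, hlen]
  | cons x rest ih =>
    intro k hdrop hk hk2 spans start cur
    have hklt : k < states.length := by
      have := congrArg List.length hdrop; simp at this; omega
    have hx : states[k] = x := by
      have h0 : (states.drop k)[0]'(by rw [hdrop]; simp) = x := by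
        simp [hdrop]
      simpa using h0
    have hget : PySem.List.pyGetD states (k : Int) "" = x := by
      rw [PySem.List.pyGetD_eq_getElem states "" (Int.natCast_nonneg k) (by exact_mod_cast hklt)]
      simpa using hx
    have hdrop' : states.drop (k + 1) = rest := by
      have h2 : List.drop 1 (states.drop k) = rest := by rw [hdrop]; simp
      rwa [List.drop_drop] at h2
    rw [PySem.List.pyRange_one_cons (by exact_mod_cast hklt)]
    simp only [List.foldl_cons]
    by_cases hne : x = cur
    · have hstep : aStep states (spans, start, cur) (k : Int) = (spans, start, cur) := by
        simp [aStep, hget, hne]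
      rw [hstep]
      have h3 := ih (k + 1) hdrop' (by omega) (by omega) spans start cur
      push_cast at h3 ⊢
      rw [h3]
      subst hne
      simp [gSpec]
    · have hstep : aStep states (spans, start, cur) (k : Int) =
          (spans ++ [(start, (k : Int) - 1, cur)], (k : Int), x) := by
        simp [aStep, hget, hne]
      rw [hstep]
      have h3 := ih (k + 1) hdrop' (by omega) (by omega) (spans ++ [(start, (k : Int) - 1, cur)]) (k : Int) x
      push_cast at h3 ⊢
      rw [h3]
      simp [gSpec, hne]

-- ===== B side =====
-- proof-side mirror of bStep acting on the REVERSED accumulator (head = rev[-1])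
def rStep (states : List String) (spans : List (Int × Int × String)) (i : Int) :
    List (Int × Int × String) :=
  match spans with
  | (s0, e0, k0) :: rest =>
    if k0 == PySem.List.pyGetD states i "" then (i, e0, k0) :: rest
    else (i, i, PySem.List.pyGetD states i "") :: (s0, e0, k0) :: rest
  | [] => [(i, i, PySem.List.pyGetD states i "")]

theorem bStep_rStep (states : List String) (rev : List (Int × Int × String)) (i : Int) :
    bStep states rev i = (rStep states rev.reverse i).reverse := by
  cases hr : rev.reverse with
  | nil =>
    have : rev = [] := by simpa using congrArg List.reverse hr
    subst this
    simp [bStep, rStep]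
  | cons a t =>
    obtain ⟨s0, e0, k0⟩ := a
    have hrev : rev = t.reverse ++ [(s0, e0, k0)] := by
      have := congrArg List.reverse hr; simpa using this
    subst hrev
    by_cases hk : k0 == PySem.List.pyGetD states i ""
    · simp [bStep, rStep, hk]
    · simp [bStep, rStep, hk]

theorem foldl_bStep_rStep (states : List String) : ∀ (xs : List Int) (rev : List (Int × Int × String)),
    xs.foldl (bStep states) rev = (xs.foldl (rStep states) rev.reverse).reverse := by
  intro xs
  induction xs with
  | nil => simp
  | cons x t ih =>
    intro rev
    simp only [List.foldl_cons]
    rw [ih, bStep_rStep]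
    simp

-- the right-to-left fold from [] over indices n-1 … i equals gSpec of the suffix at i
theorem R_fold_eq (n : Nat) : ∀ (xs : List String), xs.length ≤ n →
    ∀ (states : List String) (i : Nat) (cur : String),
      states.drop i = cur :: xs →
      (PySem.List.pyRange ((states.length : Int) - 1) ((i : Int) - 1) (-1)).foldl (rStep states) []
        = gSpec xs (i : Int) ((i : Int) + 1) cur := by
  induction n with
  | zero =>
    intro xs hxs states i cur hdrop
    have hx : xs = [] := List.length_eq_zero_iff.mp (by omega)
    subst hx
    have hlen : states.length = i + 1 := by
      have := congrArg List.length hdrop; simp at this; omega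
    have hcur : PySem.List.pyGetD states (i : Int) "" = cur := by
      rw [PySem.List.pyGetD_eq_getElem states "" (Int.natCast_nonneg i) (by exact_mod_cast (by omega : i < states.length))]
      have h0 : (states.drop i)[0]'(by rw [hdrop]; simp) = cur := by simp [hdrop]
      simpa using h0
    have hr : ((states.length : Int) - 1) = (i : Int) := by rw [hlen]; push_cast; ring
    rw [hr, PySem.List.pyRange_neg_one_cons (by omega),
        PySem.List.pyRange_neg_one_eq_nil (by omega)]
    simp [rStep, hcur, gSpec]
  | succ n ih =>
    intro xs hxs states i cur hdrop
    have hi : i < states.length := by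
      have := congrArg List.length hdrop; simp at this; omega
    have hcur : PySem.List.pyGetD states (i : Int) "" = cur := by
      rw [PySem.List.pyGetD_eq_getElem states "" (Int.natCast_nonneg i) (by exact_mod_cast hi)]
      have h0 : (states.drop i)[0]'(by rw [hdrop]; simp) = cur := by simp [hdrop]
      simpa using h0
    cases hxsc : xs with
    | nil =>
      subst hxsc
      exact ih [] (by simp) states i cur hdrop
    | cons x rest =>
      subst hxsc
      have hdrop1 : states.drop (i + 1) = x :: rest := by
        have h2 : List.drop 1 (states.drop i) = x :: rest := by rw [hdrop]; simp
        rwa [List.drop_drop] at h2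
      have hi1 : i + 1 < states.length := by
        have := congrArg List.length hdrop1; simp at this; omega
      -- split the countdown range at its right end: … = (n-1 … i+1) ++ [i]
      have hsplit : PySem.List.pyRange ((states.length : Int) - 1) ((i : Int) - 1) (-1)
          = PySem.List.pyRange ((states.length : Int) - 1) ((i : Int)) (-1) ++ [(i : Int)] := by
        rw [PySem.List.pyRange_neg_one_eq_reverse, PySem.List.pyRange_neg_one_eq_reverse]
        have : ((i : Int) - 1) + 1 = (i : Int) := by ring
        rw [this]
        rw [PySem.List.pyRange_one_cons (by omega)]
        simp
      have hFcast : (PySem.List.pyRange ((states.length : Int) - 1) ((i : Int)) (-1)).foldl (rStep states) []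
          = gSpec rest ((i : Int) + 1) ((i : Int) + 2) x := by
        have h := ih rest (by simp at hxs; omega) states (i + 1) x hdrop1
        rw [Nat.cast_add, Nat.cast_one] at h
        rw [show ((i : Int) + 1 - 1) = (i : Int) by ring] at h
        rw [show ((i : Int) + 1 + 1) = (i : Int) + 2 by ring] at h
        exact h
      rw [hsplit, List.foldl_append, hFcast]
      simp only [List.foldl_cons, List.foldl_nil]
      rw [g_run]
      by_cases hx : x = cur
      · -- states[i] continues the run that starts at i+1: lower its start to i
        subst hx
        have hr : gSpec (x :: rest) (i : Int) ((i : Int) + 1) x = gSpec rest (i : Int) ((i : Int) + 2) x := by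
          have : ((i : Int) + 1 + 1) = (i : Int) + 2 := by ring
          simp [gSpec, this]
        rw [hr, g_run]
        simp [rStep, hcur]
      · -- a new run of length ≥ 1 opens at i
        have hb : (x == cur) = false := by simp [hx]
        simp only [rStep, hcur, hb, Bool.false_eq_true, if_false]
        rw [gSpec]
        simp only [ne_eq, hx, not_false_eq_true, if_pos trivial]
        rw [g_run]
        have e1 : ((i : Int) + 1 - 1) = (i : Int) := by ring
        have e2 : ((i : Int) + 1 + 1) = (i : Int) + 2 := by ring
        rw [e1, e2]

-- ===== VERDICT (by name: the statement is the Claim_ definition above) =====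
theorem state_spans_spec : Claim_equal_state_spans := by
  intro states _
  unfold Spec_state_spans state_spans state_spans_alt
  cases hs : states with
  | nil =>
    simp [PySem.List.pyRange_neg_one_eq_nil]
  | cons s0 tail =>
    have hne : states ≠ [] := by rw [hs]; simp
    rw [← hs]
    simp only [hne, if_false]
    rw [foldl_bStep_rStep]
    simp only [List.reverse_nil, List.reverse_reverse]
    have hget0 : PySem.List.pyGetD states 0 "" = s0 := by
      rw [hs]; simp [PySem.List.pyGetD_zero_cons]
    have hA := A_loop_eq states tail 1 (by rw [hs]; simp) (by omega) (by rw [hs]; simp) [] 0 s0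
    have hB := R_fold_eq tail.length tail (le_refl _) states 0 s0 (by rw [hs]; simp)
    simp only [Nat.cast_one] at hA
    simp only [Nat.cast_zero] at hB
    rw [hget0, hA]
    norm_num at hB
    simpa using hB.symm
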